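-- pv_equiv track=rewrite | github.com/timarkh/tsakorpus | search/search_engine/query_parsers.py | make_gloss_query_src_part
-- ===== SOURCE A (Python) =====
-- def make_gloss_query_src_part(text, lang):
--     """
--     Make the part of the gloss query which is inside the curly brackets.
--     Basically, it means checking that all regular expressions within them
--     do not eat anything outside of them.
--     """
--     result = ''
--     inBrackets = False
--     prevBackslash = False
--     for c in text:
--         if prevBackslash:
--             result += c
--             prevBackslash = False
--             continue
--         if c == '\\':
--             result += c
--             prevBackslash = True
--             continue
--         if c == '[':
--             inBrackets = True
--         elif c == ']':
--             inBrackets = False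
--         elif c == '.' and not inBrackets:
--             c = '[^{}]'
--         result += c
--     return result
-- ===== SOURCE B (Python) =====
-- def make_gloss_query_src_part(text, lang):
--     """
--     Make the part of the gloss query which is inside the curly brackets.
--     Basically, it means checking that all regular expressions within them
--     do not eat anything outside of them.
--     """
--     out = []
--     i = 0
--     n = len(text)
--     while i < n:
--         c = text[i]
--         if c == '\\':
--             out.append(text[i:i + 2])
--             i += 2
--         elif c == '[':
--             # copy the whole bracket segment verbatim, up to the first
--             # unescaped ']' (inclusive) or the end of the string
--             j = i + 1
--             while j < n:
--                 if text[j] == '\\':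
--                     j += 2
--                 elif text[j] == ']':
--                     j += 1
--                     break
--                 else:
--                     j += 1
--             out.append(text[i:j])
--             i = j
--         elif c == '.':
--             out.append('[^{}]')
--             i += 1
--         else:
--             out.append(c)
--             i += 1
--     return ''.join(out)
-- ===== Notes on version B (the rewrite author's own statement) =====
-- stated objective: alternative
-- what changed: Replaces the per-character loop with inBrackets/prevBackslash state flags by a flag-free scan that consumes backslash-escaped pairs as two-character units and copies each whole bracket segment verbatim (to the first unescaped ']' or end) in one inner scan, joining the pieces at the end.
import Mathlib
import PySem

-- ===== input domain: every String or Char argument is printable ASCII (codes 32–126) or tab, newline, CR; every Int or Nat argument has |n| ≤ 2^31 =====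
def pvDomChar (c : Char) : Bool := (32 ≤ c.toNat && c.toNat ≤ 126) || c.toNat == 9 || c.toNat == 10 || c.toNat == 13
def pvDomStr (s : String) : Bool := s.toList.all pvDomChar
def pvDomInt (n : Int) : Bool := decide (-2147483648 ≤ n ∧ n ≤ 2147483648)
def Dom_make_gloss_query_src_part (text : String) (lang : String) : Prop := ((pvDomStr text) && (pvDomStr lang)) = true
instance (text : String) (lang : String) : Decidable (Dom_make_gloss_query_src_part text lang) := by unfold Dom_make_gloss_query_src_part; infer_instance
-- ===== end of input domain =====

-- B replaces A's flag-driven per-character loop by a scan that consumes backslash pairs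
-- and whole bracket segments as units (objective: alternative decomposition, same cost).


-- ===== PORT A =====
-- state: (result so far, inBrackets, prevBackslash); exactly A's loop body
def glossStep (s : List Char × Bool × Bool) (c : Char) : List Char × Bool × Bool :=
  match s with
  | (acc, inB, pb) =>
    if pb then (acc ++ [c], inB, false)
    else if c = '\\' then (acc ++ [c], inB, true)
    else if c = '[' then (acc ++ [c], true, false)
    else if c = ']' then (acc ++ [c], false, false)
    else if c = '.' && !inB then (acc ++ ['[', '^', '{', '}', ']'], inB, false)
    else (acc ++ [c], inB, false)

def make_gloss_query_src_part (text : String) (lang : String) : String :=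
  String.ofList (List.foldl glossStep ([], false, false) text.toList).1

-- ===== PORT B =====
-- copy a bracket segment verbatim (consuming backslash-escaped pairs as pairs) up to
-- the first unescaped ']' inclusive, or the end; returns (segment, remainder)
def glossScanBracket : List Char → List Char × List Char
  | [] => ([], [])
  | c :: rest =>
    if c = '\\' then
      match rest with
      | [] => ([c], [])
      | d :: r => ((c :: d :: (glossScanBracket r).1), (glossScanBracket r).2)
    else if c = ']' then ([c], rest)
    else ((c :: (glossScanBracket rest).1), (glossScanBracket rest).2)

-- needed by glossAltGo's termination argument
theorem glossScanBracket_len (l : List Char) : (glossScanBracket l).2.length ≤ l.length := by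
  fun_induction glossScanBracket l <;> simp_all <;> omega

def glossAltGo : List Char → List Char
  | [] => []
  | c :: rest =>
    if c = '\\' then
      match rest with
      | [] => [c]
      | d :: r => c :: d :: glossAltGo r
    else if c = '[' then
      c :: ((glossScanBracket rest).1 ++ glossAltGo (glossScanBracket rest).2)
    else if c = '.' then '[' :: '^' :: '{' :: '}' :: ']' :: glossAltGo rest
    else c :: glossAltGo rest
termination_by l => l.length
decreasing_by
  all_goals simp
  all_goals first
    | omega
    | exact glossScanBracket_len _

def make_gloss_query_src_part_alt (text : String) (lang : String) : String :=
  String.ofList (glossAltGo text.toList)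

-- ===== PRECONDITION & SPEC =====
def Spec_make_gloss_query_src_part (text : String) (lang : String) (out : String) : Prop := out = make_gloss_query_src_part_alt text lang
instance (text : String) (lang : String) (out : String) : Decidable (Spec_make_gloss_query_src_part text lang out) := by unfold Spec_make_gloss_query_src_part; infer_instance

-- ===== CLAIM (what is proved, stated in full; the proofs are below) =====
def Claim_equal_make_gloss_query_src_part : Prop := ∀ (text : String) (lang : String), Dom_make_gloss_query_src_part text lang → Spec_make_gloss_query_src_part text lang (make_gloss_query_src_part text lang)

-- ===== LEMMAS AND PROOFS =====

theorem glossStep_pb (acc : List Char) (inB : Bool) (c : Char) :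
    glossStep (acc, inB, true) c = (acc ++ [c], inB, false) := by
  simp [glossStep]

theorem glossStep_bs (acc : List Char) (inB : Bool) :
    glossStep (acc, inB, false) '\\' = (acc ++ ['\\'], inB, true) := by
  simp [glossStep]

theorem glossStep_ob (acc : List Char) (inB : Bool) :
    glossStep (acc, inB, false) '[' = (acc ++ ['['], true, false) := by
  simp [glossStep]

theorem glossStep_cb (acc : List Char) (inB : Bool) :
    glossStep (acc, inB, false) ']' = (acc ++ [']'], false, false) := by
  simp [glossStep]

theorem glossStep_dot (acc : List Char) :
    glossStep (acc, false, false) '.' = (acc ++ ['[', '^', '{', '}', ']'], false, false) := by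
  simp [glossStep]

theorem glossStep_other (acc : List Char) (inB : Bool) (c : Char)
    (h1 : c ≠ '\\') (h2 : c ≠ '[') (h3 : c ≠ ']') (h4 : (c = '.' && !inB) = false) :
    glossStep (acc, inB, false) c = (acc ++ [c], inB, false) := by
  simp [glossStep, h1, h2, h3, h4]

-- the combined loop invariant: A's fold in normal mode produces altGo of the rest, and
-- in bracket mode the scanned segment followed by altGo of the remainder
theorem gloss_main (n : Nat) : ∀ l : List Char, l.length ≤ n →
    (∀ acc : List Char, (List.foldl glossStep (acc, false, false) l).1 = acc ++ glossAltGo l) ∧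
    (∀ acc : List Char, (List.foldl glossStep (acc, true, false) l).1
        = acc ++ (glossScanBracket l).1 ++ glossAltGo (glossScanBracket l).2) := by
  induction n with
  | zero =>
    intro l hl
    have : l = [] := List.eq_nil_of_length_eq_zero (Nat.le_zero.mp hl)
    subst this
    simp [glossAltGo.eq_def, glossScanBracket.eq_def]
  | succ n ih =>
    intro l hl
    match l with
    | [] => simp [glossAltGo.eq_def, glossScanBracket.eq_def]
    | c :: rest =>
      have hrest : rest.length ≤ n := by simpa using hl
      constructor
      · intro acc
        by_cases hbs : c = '\\'
        · subst hbs
          match rest with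
          | [] => simp [glossStep, glossAltGo.eq_def]
          | d :: r =>
            have hr : r.length ≤ n := by simp at hrest; omega
            rw [List.foldl_cons, glossStep_bs, List.foldl_cons, glossStep_pb,
              show glossAltGo ('\\' :: d :: r) = '\\' :: d :: glossAltGo r from by
                rw [glossAltGo.eq_def]; simp,
              (ih r hr).1 (acc ++ ['\\'] ++ [d])]
            simp
        · by_cases hob : c = '['
          · subst hob
            rw [List.foldl_cons, glossStep_ob,
              show glossAltGo ('[' :: rest)
                  = '[' :: ((glossScanBracket rest).1 ++ glossAltGo (glossScanBracket rest).2)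
                from by rw [glossAltGo.eq_def]; simp,
              (ih rest hrest).2 (acc ++ ['['])]
            simp
          · by_cases hcb : c = ']'
            · subst hcb
              rw [List.foldl_cons, glossStep_cb,
                show glossAltGo (']' :: rest) = ']' :: glossAltGo rest from by
                  rw [glossAltGo.eq_def]; simp,
                (ih rest hrest).1 (acc ++ [']'])]
              simp
            · by_cases hdot : c = '.'
              · subst hdot
                rw [List.foldl_cons, glossStep_dot,
                  show glossAltGo ('.' :: rest)
                      = '[' :: '^' :: '{' :: '}' :: ']' :: glossAltGo rest from by
                    rw [glossAltGo.eq_def]; simp,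
                  (ih rest hrest).1 (acc ++ ['[', '^', '{', '}', ']'])]
                simp
              · rw [List.foldl_cons, glossStep_other acc false c hbs hob hcb (by simp [hdot]),
                  show glossAltGo (c :: rest) = c :: glossAltGo rest from by
                    rw [glossAltGo.eq_def]; simp [hbs, hob, hdot],
                  (ih rest hrest).1 (acc ++ [c])]
                simp
      · intro acc
        by_cases hbs : c = '\\'
        · subst hbs
          match rest with
          | [] => simp [glossStep, glossScanBracket.eq_def, glossAltGo.eq_def]
          | d :: r =>
            have hr : r.length ≤ n := by simp at hrest; omega
            rw [List.foldl_cons, glossStep_bs, List.foldl_cons, glossStep_pb,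
              show glossScanBracket ('\\' :: d :: r)
                  = ('\\' :: d :: (glossScanBracket r).1, (glossScanBracket r).2) from by
                rw [glossScanBracket.eq_def]; simp,
              (ih r hr).2 (acc ++ ['\\'] ++ [d])]
            simp
        · by_cases hcb : c = ']'
          · subst hcb
            rw [List.foldl_cons, glossStep_cb,
              show glossScanBracket (']' :: rest) = ([']'], rest) from by
                rw [glossScanBracket.eq_def]; simp,
              (ih rest hrest).1 (acc ++ [']'])]
          · by_cases hob : c = '['
            · subst hob
              rw [List.foldl_cons, glossStep_ob,
                show glossScanBracket ('[' :: rest)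
                    = ('[' :: (glossScanBracket rest).1, (glossScanBracket rest).2) from by
                  rw [glossScanBracket.eq_def]; simp,
                (ih rest hrest).2 (acc ++ ['['])]
              simp
            · rw [List.foldl_cons, glossStep_other acc true c hbs hob hcb (by simp),
                show glossScanBracket (c :: rest)
                    = (c :: (glossScanBracket rest).1, (glossScanBracket rest).2) from by
                  rw [glossScanBracket.eq_def]; simp [hbs, hcb],
                (ih rest hrest).2 (acc ++ [c])]
              simp

-- ===== VERDICT (by name: the statement is the Claim_ definition above) =====
theorem make_gloss_query_src_part_spec : Claim_equal_make_gloss_query_src_part := by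
  intro text lang _
  unfold Spec_make_gloss_query_src_part make_gloss_query_src_part make_gloss_query_src_part_alt
  rw [(gloss_main text.toList.length text.toList le_rfl).1 []]
  simp
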